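-- pv_equiv track=rewrite | github.com/tacchan7412/Bioinformatics | bioinformatics_1/week1/clump_find.py | find_clump
-- ===== SOURCE A (Python) =====
-- def find_clump(genome, k, L, t):
--     ans = []
--     cnt_dict = {}
--     for j in range(L-k+1):
--         cnt_dict[genome[j:j+k]] = (cnt_dict.get(genome[j:j+k]) or 0) + 1
--     for key, val in cnt_dict.items():
--         if val >= t:
--             ans.append(key)
--     for i in range(len(genome)-L):
--         cnt_dict[genome[i:i+k]] -= 1
--         cnt_dict[genome[L-k+1+i:L+i+1]] = (cnt_dict.get(genome[L-k+1+i:L+i+1]) or 0) + 1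
--         if cnt_dict[genome[L-k+1+i:L+i+1]] >= t:
--             ans.append(genome[L-k+1+i:L+i+1])
--     return set(ans)
-- ===== SOURCE B (Python) =====
-- def find_clump(genome, k, L, t):
--     result = set()
--     for start in range(max(len(genome) - L, 0) + 1):
--         counts = {}
--         for j in range(start, start + L - k + 1):
--             kmer = genome[j:j+k]
--             counts[kmer] = counts.get(kmer, 0) + 1
--         for kmer, c in counts.items():
--             if c >= t:
--                 result.add(kmer)
--     return result
-- ===== Notes on version B (the rewrite author's own statement) =====
-- stated objective: simpler
-- what changed: A's incremental sliding-window update (decrement the leaving k-mer, increment the entering one, check only the new k-mer) is replaced by an independent brute-force recount: for every window start, build a fresh count dict of that window's k-mers and add every k-mer reaching t to the result set.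
-- outside the precondition, e.g. on find_clump('abcde', -1000000, -4000, 1): A returns {''}, B does not finish within the time limit; on find_clump('abc', -2, -1, 1): A returns {'', 'a', 'b'}, B returns {'', 'a', 'b'}
import Mathlib
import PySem

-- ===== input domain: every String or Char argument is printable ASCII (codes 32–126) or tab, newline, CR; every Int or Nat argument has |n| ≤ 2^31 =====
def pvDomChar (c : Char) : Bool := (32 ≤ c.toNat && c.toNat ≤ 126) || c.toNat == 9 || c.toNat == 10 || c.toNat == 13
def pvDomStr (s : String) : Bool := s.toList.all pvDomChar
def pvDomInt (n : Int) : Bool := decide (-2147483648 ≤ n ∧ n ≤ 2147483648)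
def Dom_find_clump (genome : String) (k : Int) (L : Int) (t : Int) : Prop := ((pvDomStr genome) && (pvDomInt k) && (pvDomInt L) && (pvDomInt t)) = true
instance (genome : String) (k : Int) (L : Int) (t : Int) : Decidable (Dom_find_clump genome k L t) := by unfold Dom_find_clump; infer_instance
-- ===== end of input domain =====

-- B replaces A's incremental slide-and-update counting by an independent recount of every window (simpler); return-value equivalence only.

-- ===== PORT A =====
-- loop body of A's third loop ('cnt_dict[genome[i:i+k]] -= 1; …'); 'none' models the KeyError
-- Python's '(cnt_dict.get(x) or 0)' equals get-with-default-0 on integer values, ported as getD 0.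
def pvStepA (genome : String) (k L t : Int) (st : Option (PySem.Dict String Int × List String)) (i : Int) :
    Option (PySem.Dict String Int × List String) :=
  match st with
  | none => none
  | some (d, a) =>
    match d.get? (PySem.Str.slice genome (some i) (some (i + k))) with
    | none => none  -- Python raises KeyError here; excluded by Pre_find_clump
    | some v =>
      let d1 := d.insert (PySem.Str.slice genome (some i) (some (i + k))) (v - 1)
      let nw := PySem.Str.slice genome (some (L - k + 1 + i)) (some (L + i + 1))
      let d2 := d1.insert nw ((d1.get? nw).getD 0 + 1)
      if t ≤ d2.getD nw 0 then some (d2, a ++ [nw]) else some (d2, a)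

def find_clump (genome : String) (k : Int) (L : Int) (t : Int) : List String :=
  let cnt0 := (PySem.List.pyRange 0 (L - k + 1) 1).foldl
      (fun d j => d.insert (PySem.Str.slice genome (some j) (some (j + k)))
        ((d.get? (PySem.Str.slice genome (some j) (some (j + k)))).getD 0 + 1))
      PySem.Dict.empty
  let ans0 := cnt0.items.foldl (fun a kv => if t ≤ kv.2 then a ++ [kv.1] else a) ([] : List String)
  match (PySem.List.pyRange 0 (PySem.Str.len genome - L) 1).foldl (pvStepA genome k L t) (some (cnt0, ans0)) with
  | some (_, a) => PySem.Set.ofList a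
  | none => []  -- unreachable under Pre_find_clump (KeyError)

-- ===== PORT B =====
-- one window of B: recount the k-mers of genome[start : start+L] from scratch, add the ≥ t ones
def pvStepB (genome : String) (k L t : Int) (res : PySem.Set String) (start : Int) : PySem.Set String :=
  let counts := (PySem.List.pyRange start (start + L - k + 1) 1).foldl
      (fun d j => d.insert (PySem.Str.slice genome (some j) (some (j + k)))
        (d.getD (PySem.Str.slice genome (some j) (some (j + k))) 0 + 1))
      PySem.Dict.empty
  counts.items.foldl (fun r kv => if t ≤ kv.2 then r.add kv.1 else r) res

def find_clump_alt (genome : String) (k : Int) (L : Int) (t : Int) : List String :=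
  (PySem.List.pyRange 0 (max (PySem.Str.len genome - L) 0 + 1) 1).foldl
    (pvStepB genome k L t) PySem.Set.empty

-- ===== PRECONDITION & SPEC =====
-- Pre_ excludes (a) the inputs where A raises KeyError — k > L (the first loop counts nothing)
-- together with len(genome) > L (the third loop then decrements a key absent from the dict) — and
-- (b) the inputs with k ≤ 0 and L < len(genome), outside the task's natural domain (a k-mer length
-- must be positive): A happens to return a set of accidental negative-end slices there, and B's
-- per-window recount, while agreeing with A wherever it finishes, can be astronomically slower.
def Pre_find_clump (genome : String) (k : Int) (L : Int) (t : Int) : Prop :=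
  (1 ≤ k ∧ k ≤ L) ∨ PySem.Str.len genome ≤ L
instance (genome : String) (k : Int) (L : Int) (t : Int) : Decidable (Pre_find_clump genome k L t) := by
  unfold Pre_find_clump; infer_instance
def pvWitness_find_clump : String × Int × Int × Int := ("GATCAGATC", 2, 5, 2)

def Spec_find_clump (genome : String) (k : Int) (L : Int) (t : Int) (out : List String) : Prop := out = find_clump_alt genome k L t
instance (genome : String) (k : Int) (L : Int) (t : Int) (out : List String) : Decidable (Spec_find_clump genome k L t out) := by unfold Spec_find_clump; infer_instance

-- ===== CLAIM (what is proved, stated in full; the proofs are below) =====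
def Claim_equal_find_clump : Prop := ∀ (genome : String) (k : Int) (L : Int) (t : Int), Dom_find_clump genome k L t → Pre_find_clump genome k L t → Spec_find_clump genome k L t (find_clump genome k L t)

-- ===== LEMMAS AND PROOFS =====

-- the k-mer starting at j, and the window of k-mers with start positions a ≤ j < b
def pvKey (g : String) (k j : Int) : String := PySem.Str.slice g (some j) (some (j + k))
def pvWin (g : String) (k a b : Int) : List String := (PySem.List.pyRange a b 1).map (pvKey g k)
-- the k-mers of a window whose multiplicity reaches t, in first-occurrence order
def pvQual (t : Int) (xs : List String) : List String :=
  (PySem.Set.ofList xs).filter (fun s => decide (t ≤ (xs.count s : Int)))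

lemma pvCounterA (g : String) (k a b : Int) :
    (PySem.List.pyRange a b 1).foldl
      (fun d j => d.insert (PySem.Str.slice g (some j) (some (j + k)))
        ((d.get? (PySem.Str.slice g (some j) (some (j + k)))).getD 0 + 1)) PySem.Dict.empty
    = PySem.Dict.counter (pvWin g k a b) := by
  rw [← PySem.Dict.foldl_insert_getD_add_one_eq_counter, pvWin, List.foldl_map]
  simp only [PySem.Dict.getD_eq_get?_getD, pvKey]

lemma pvCounterB (g : String) (k a b : Int) :
    (PySem.List.pyRange a b 1).foldl
      (fun d j => d.insert (PySem.Str.slice g (some j) (some (j + k)))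
        (d.getD (PySem.Str.slice g (some j) (some (j + k))) 0 + 1)) PySem.Dict.empty
    = PySem.Dict.counter (pvWin g k a b) := by
  rw [← PySem.Dict.foldl_insert_getD_add_one_eq_counter, pvWin, List.foldl_map]
  simp only [pvKey]

lemma pvFoldAppendIf (t : Int) (l : List (String × Int)) (a0 : List String) :
    l.foldl (fun a kv => if t ≤ kv.2 then a ++ [kv.1] else a) a0
    = a0 ++ (l.filter (fun kv => decide (t ≤ kv.2))).map Prod.fst := by
  induction l generalizing a0 with
  | nil => simp
  | cons x l ih =>
    simp only [List.foldl_cons, List.filter_cons]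
    by_cases h : t ≤ x.2
    · simp [h, ih]
    · simp [h, ih]

lemma pvFoldAddIf (t : Int) (l : List (String × Int)) (S : PySem.Set String) :
    l.foldl (fun r kv => if t ≤ kv.2 then r.add kv.1 else r) S
    = ((l.filter (fun kv => decide (t ≤ kv.2))).map Prod.fst).foldl PySem.Set.add S := by
  induction l generalizing S with
  | nil => simp
  | cons x l ih =>
    simp only [List.foldl_cons, List.filter_cons]
    by_cases h : t ≤ x.2
    · simp [h, ih]
    · simp [h, ih]

lemma pvItemsQual (t : Int) (xs : List String) :
    ((PySem.Dict.counter xs).items.filter (fun kv => decide (t ≤ kv.2))).map Prod.fst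
    = pvQual t xs := by
  rw [PySem.Dict.items_counter, List.filter_map, List.map_map, pvQual]
  simp [Function.comp_def]

lemma pvAddOfMem (S : PySem.Set String) (x : String) (h : x ∈ S) : S.add x = S := by
  simp [PySem.Set.add, PySem.Set.contains, h]

lemma pvAddOfNotMem (S : PySem.Set String) (x : String) (h : ¬ x ∈ S) : S.add x = S ++ [x] := by
  simp [PySem.Set.add, PySem.Set.contains, h]

lemma pvFoldAddAllMem (l : List String) (S : PySem.Set String) (h : ∀ x ∈ l, x ∈ S) :
    l.foldl PySem.Set.add S = S := by
  induction l with
  | nil => rfl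
  | cons x l ih =>
    rw [List.foldl_cons, pvAddOfMem S x (h x (by simp))]
    exact ih (fun y hy => h y (by simp [hy]))

lemma pvFoldAddOrEq (l : List String) (S : PySem.Set String) (y : String)
    (h : ∀ x ∈ l, x ∈ S ∨ x = y) :
    l.foldl PySem.Set.add S = if y ∈ l ∧ ¬ y ∈ S then S ++ [y] else S := by
  induction l generalizing S with
  | nil => simp
  | cons x l ih =>
    rw [List.foldl_cons]
    by_cases hx : x ∈ S
    · rw [pvAddOfMem S x hx, ih S (fun y hy => h y (by simp [hy]))]
      by_cases hyS : y ∈ S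
      · simp [hyS]
      · have hxy : x ≠ y := fun he => hyS (he ▸ hx)
        have hxy' : ¬ y = x := fun he => hxy he.symm
        simp [List.mem_cons, hyS, hxy']
    · have hxy : x = y := (h x (by simp)).resolve_left hx
      subst hxy
      rw [pvAddOfNotMem S x hx]
      rw [pvFoldAddAllMem l (S ++ [x]) (fun z hz => by
        rcases h z (by simp [hz]) with hzS | hzx
        · exact List.mem_append_left _ hzS
        · simp [hzx])]
      simp [hx]

lemma pvOfListAppend (a l : List String) :
    PySem.Set.ofList (a ++ l) = l.foldl PySem.Set.add (PySem.Set.ofList a) := by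
  rw [PySem.Set.ofList_eq_foldl, PySem.Set.ofList_eq_foldl, List.foldl_append]

lemma pvStepB_eq (g : String) (k L t : Int) (S : PySem.Set String) (start : Int) :
    pvStepB g k L t S start
    = (pvQual t (pvWin g k start (start + (L - k + 1)))).foldl PySem.Set.add S := by
  have hb : start + L - k + 1 = start + (L - k + 1) := by ring
  rw [pvStepB, hb, pvCounterB, pvFoldAddIf, pvItemsQual]

-- window decompositions
lemma pvWinCons (g : String) (k : Int) (i m : Int) (hm : 1 ≤ m) :
    pvWin g k i (i + m) = pvKey g k i :: pvWin g k (i + 1) (i + m) := by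
  rw [pvWin, pvWin, PySem.List.pyRange_one_cons (by omega)]
  simp

lemma pvWinSnoc (g : String) (k : Int) (i m : Int) (hm : 1 ≤ m) :
    pvWin g k (i + 1) ((i + 1) + m) = pvWin g k (i + 1) (i + m) ++ [pvKey g k (i + m)] := by
  have h : (i + 1) + m = (i + m) + 1 := by ring
  rw [pvWin, pvWin, h, PySem.List.pyRange_one_succ_right (by omega)]
  simp

-- the main invariant of A's sliding loop, relating it to B's per-window recount
lemma pvInv (g : String) (k L t : Int) (hm : 1 ≤ L - k + 1) (i : ℕ) :
    ∃ d a, (PySem.List.pyRange 0 (i : Int) 1).foldl (pvStepA g k L t)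
        (some (PySem.Dict.counter (pvWin g k 0 (L - k + 1)), pvQual t (pvWin g k 0 (L - k + 1))))
        = some (d, a)
      ∧ (∀ s, d.getD s 0 = ((pvWin g k i ((i : Int) + (L - k + 1))).count s : Int))
      ∧ PySem.Set.ofList a = (PySem.List.pyRange 0 ((i : Int) + 1) 1).foldl (pvStepB g k L t) PySem.Set.empty
      ∧ (∀ s ∈ pvQual t (pvWin g k i ((i : Int) + (L - k + 1))), s ∈ a) := by
  induction i with
  | zero =>
    refine ⟨PySem.Dict.counter (pvWin g k 0 (L - k + 1)), pvQual t (pvWin g k 0 (L - k + 1)),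
      by simp [PySem.List.pyRange_one_eq_nil], ?_, ?_, ?_⟩
    · intro s
      rw [PySem.Dict.getD_counter]
      norm_num
    · have h01 : PySem.List.pyRange (0:Int) ((0:ℕ) + 1) 1 = [0] := by
        rw [PySem.List.pyRange_one_cons (by norm_num), PySem.List.pyRange_one_eq_nil (by norm_num)]
      rw [h01, List.foldl_cons, List.foldl_nil, pvStepB_eq]
      rw [PySem.Set.ofList_eq_foldl]
      norm_num
    · intro s hs
      simpa using hs
  | succ i ih =>
    obtain ⟨d, a, hfold, hcnt, hofl, hsub⟩ := ih
    -- names for the old and new k-mers and the shared middle of the two windows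
    have hkold : PySem.Str.slice g (some (i:Int)) (some ((i:Int) + k)) = pvKey g k i := rfl
    have e1 : L - k + 1 + (i:Int) = (i:Int) + (L - k + 1) := by ring
    have e2 : L + (i:Int) + 1 = ((i:Int) + (L - k + 1)) + k := by ring
    have hknew : PySem.Str.slice g (some (L - k + 1 + (i:Int))) (some (L + (i:Int) + 1))
        = pvKey g k ((i:Int) + (L - k + 1)) := by rw [e1, e2]; rfl
    have hwc : pvWin g k i ((i:Int) + (L - k + 1))
        = pvKey g k i :: pvWin g k ((i:Int) + 1) ((i:Int) + (L - k + 1)) :=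
      pvWinCons g k i (L - k + 1) hm
    have hws : pvWin g k ((i:Int) + 1) (((i:Int) + 1) + (L - k + 1))
        = pvWin g k ((i:Int) + 1) ((i:Int) + (L - k + 1)) ++ [pvKey g k ((i:Int) + (L - k + 1))] :=
      pvWinSnoc g k i (L - k + 1) hm
    set mid := pvWin g k ((i:Int) + 1) ((i:Int) + (L - k + 1)) with hmid
    set oldk := pvKey g k i with holdk
    set nwk := pvKey g k ((i:Int) + (L - k + 1)) with hnwk
    -- the old k-mer is present in the dict
    have hmemold : oldk ∈ pvWin g k i ((i:Int) + (L - k + 1)) := by rw [hwc]; exact List.mem_cons_self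
    have hcpos : 0 < (pvWin g k i ((i:Int) + (L - k + 1))).count oldk := List.count_pos_iff.2 hmemold
    obtain ⟨v, hg⟩ : ∃ v, d.get? (PySem.Str.slice g (some (i:Int)) (some ((i:Int) + k))) = some v := by
      rw [hkold]
      cases hq : d.get? oldk with
      | none =>
        have := PySem.Dict.getD_of_get?_eq_none d (0:Int) hq
        rw [hcnt oldk] at this
        omega
      | some v => exact ⟨v, rfl⟩
    have hv : v = ((pvWin g k i ((i:Int) + (L - k + 1))).count oldk : Int) := by
      have := PySem.Dict.getD_of_get?_eq_some d (0:Int) hg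
      rw [hkold] at this
      rw [← this, hcnt oldk]
    -- unfold one step of A's loop
    have hsplit : PySem.List.pyRange 0 ((i:ℕ) + 1 : ℕ) 1
        = PySem.List.pyRange 0 (i:Int) 1 ++ [(i:Int)] := by
      push_cast
      exact PySem.List.pyRange_one_succ_right (by positivity)
    rw [hsplit, List.foldl_append, hfold, List.foldl_cons, List.foldl_nil]
    simp only [pvStepA, hg]
    set d1 := d.insert (PySem.Str.slice g (some (i:Int)) (some ((i:Int) + k))) (v - 1) with hd1
    have hd1' : d1 = d.insert oldk (v - 1) := by rw [hd1, hkold]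
    set c := (d1.get? (PySem.Str.slice g (some (L - k + 1 + (i:Int))) (some (L + (i:Int) + 1)))).getD 0 + 1 with hcdef
    have hc' : c = d1.getD nwk 0 + 1 := by
      rw [hcdef, ← PySem.Dict.getD_eq_get?_getD, hknew]
    -- count bookkeeping between window i and window i+1
    have hcount_old : ((pvWin g k i ((i:Int) + (L - k + 1))).count oldk : Int)
        = (mid.count oldk : Int) + 1 := by
      rw [hwc]
      simp
    have hcount_ne : ∀ s, s ≠ oldk → (pvWin g k i ((i:Int) + (L - k + 1))).count s = mid.count s := by
      intro s hs
      have hs' : ¬ oldk = s := fun h => hs h.symm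
      rw [hwc]
      simp [hs']
    have hcount_new : ∀ s, (pvWin g k ((i:Int) + 1) (((i:Int) + 1) + (L - k + 1))).count s
        = mid.count s + (if s = nwk then 1 else 0) := by
      intro s
      rw [hws]
      by_cases h : s = nwk
      · simp [List.count_append, h]
      · have h' : ¬ nwk = s := fun he => h he.symm
        simp [List.count_append, h, h']
    -- value stored for the new k-mer = its count in window i+1
    have hcval : c = ((pvWin g k ((i:Int) + 1) (((i:Int) + 1) + (L - k + 1))).count nwk : Int) := by
      rw [hc', hd1', PySem.Dict.getD_insert]
      have h2 : (pvWin g k ((i:Int) + 1) (((i:Int) + 1) + (L - k + 1))).count nwk = mid.count nwk + 1 := by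
        rw [hcount_new]; simp
      by_cases h : nwk = oldk
      · have h1 : v = (mid.count oldk : Int) + 1 := by rw [hv, hcount_old]
        rw [if_pos h, h1, h2, ← h]
        push_cast
        ring
      · have h3 : d.getD nwk 0 = (mid.count nwk : Int) := by rw [hcnt nwk, hcount_ne nwk h]
        rw [if_neg h, h3, h2]
        push_cast
        ring
    -- the new dict satisfies the count invariant for window i+1
    have hcnt' : ∀ s, ((d1.insert (PySem.Str.slice g (some (L - k + 1 + (i:Int))) (some (L + (i:Int) + 1))) c).getD s 0)
        = ((pvWin g k ((i:Int) + 1) (((i:Int) + 1) + (L - k + 1))).count s : Int) := by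
      intro s
      rw [hknew, PySem.Dict.getD_insert]
      by_cases h1 : s = nwk
      · rw [if_pos h1, hcval, h1]
      · rw [if_neg h1, hd1', PySem.Dict.getD_insert, hcount_new]
        by_cases h2 : s = oldk
        · rw [if_pos h2, hv, h2, hcount_old]
          simp [if_neg (h2 ▸ h1)]
        · rw [if_neg h2, hcnt s, hcount_ne s h2]
          simp [if_neg h1]
    -- membership facts for window i+1's qualifying k-mers
    have hq_mem : ∀ x ∈ pvQual t (pvWin g k ((i:Int) + 1) (((i:Int) + 1) + (L - k + 1))),
        x = nwk ∨ x ∈ pvQual t (pvWin g k i ((i:Int) + (L - k + 1))) := by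
      intro x hx
      rw [pvQual, List.mem_filter] at hx
      obtain ⟨hx1, hx2⟩ := hx
      rw [PySem.Set.mem_ofList] at hx1
      rw [decide_eq_true_iff] at hx2
      by_cases hxe : x = nwk
      · exact Or.inl hxe
      · right
        have hxmid : x ∈ mid := by
          rw [hws] at hx1
          rcases List.mem_append.1 hx1 with h | h
          · exact h
          · simp at h; exact absurd h hxe
        have hcx : (pvWin g k ((i:Int) + 1) (((i:Int) + 1) + (L - k + 1))).count x = mid.count x := by
          rw [hcount_new]; simp [if_neg hxe]
        have hxwin : x ∈ pvWin g k i ((i:Int) + (L - k + 1)) := by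
          rw [hwc]; exact List.mem_cons_of_mem _ hxmid
        have hcx2 : mid.count x ≤ (pvWin g k i ((i:Int) + (L - k + 1))).count x := by
          by_cases h2 : x = oldk
          · rw [h2]
            have hle : (mid.count oldk : Int) ≤ ((pvWin g k i ((i:Int) + (L - k + 1))).count oldk : Int) := by
              rw [hcount_old]; omega
            exact_mod_cast hle
          · rw [hcount_ne x h2]
        rw [pvQual, List.mem_filter]
        refine ⟨(PySem.Set.mem_ofList _ _).2 hxwin, ?_⟩
        rw [decide_eq_true_iff]
        rw [hcx] at hx2
        have : (mid.count x : Int) ≤ ((pvWin g k i ((i:Int) + (L - k + 1))).count x : Int) := by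
          exact_mod_cast hcx2
        omega
    have hnw_qual : nwk ∈ pvQual t (pvWin g k ((i:Int) + 1) (((i:Int) + 1) + (L - k + 1))) ↔ t ≤ c := by
      rw [pvQual, List.mem_filter, hcval]
      constructor
      · intro ⟨_, h⟩; exact of_decide_eq_true h
      · intro h
        refine ⟨(PySem.Set.mem_ofList _ _).2 ?_, decide_eq_true h⟩
        rw [hws]
        simp
    -- B's next partial result
    have hBnext : (PySem.List.pyRange 0 ((i:Int) + 1 + 1) 1).foldl (pvStepB g k L t) PySem.Set.empty
        = (pvQual t (pvWin g k ((i:Int) + 1) (((i:Int) + 1) + (L - k + 1)))).foldl PySem.Set.add (PySem.Set.ofList a) := by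
      have hsplit2 : PySem.List.pyRange 0 ((i:Int) + 1 + 1) 1
          = PySem.List.pyRange 0 ((i:Int) + 1) 1 ++ [(i:Int) + 1] :=
        PySem.List.pyRange_one_succ_right (by positivity)
      rw [hsplit2, List.foldl_append, List.foldl_cons, List.foldl_nil, ← hofl, pvStepB_eq]
    have hor : ∀ x ∈ pvQual t (pvWin g k ((i:Int) + 1) (((i:Int) + 1) + (L - k + 1))),
        x ∈ PySem.Set.ofList a ∨ x = nwk := by
      intro x hx
      rcases hq_mem x hx with h | h
      · exact Or.inr h
      · exact Or.inl ((PySem.Set.mem_ofList _ _).2 (hsub x h))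
    have hd2nw : (d1.insert (PySem.Str.slice g (some (L - k + 1 + (i:Int))) (some (L + (i:Int) + 1))) c).getD
        (PySem.Str.slice g (some (L - k + 1 + (i:Int))) (some (L + (i:Int) + 1))) 0 = c :=
      PySem.Dict.getD_insert_self _ _ _ _
    by_cases ht : t ≤ c
    · rw [if_pos (by rw [hd2nw]; exact ht)]
      refine ⟨_, _, rfl, ?_, ?_, ?_⟩
      · push_cast
        exact hcnt'
      · push_cast
        rw [hknew, hBnext, pvFoldAddOrEq _ _ nwk hor, pvOfListAppend, List.foldl_cons, List.foldl_nil]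
        have hnwin : nwk ∈ pvQual t (pvWin g k ((i:Int) + 1) (((i:Int) + 1) + (L - k + 1))) := hnw_qual.2 ht
        by_cases hin : nwk ∈ PySem.Set.ofList a
        · rw [if_neg (by simp [hin]), pvAddOfMem _ _ hin]
        · rw [if_pos ⟨hnwin, hin⟩, pvAddOfNotMem _ _ hin]
      · push_cast
        rw [hknew]
        intro s hs
        rcases hq_mem s hs with h | h
        · simp [h]
        · exact List.mem_append_left _ (hsub s h)
    · rw [if_neg (by rw [hd2nw]; exact ht)]
      refine ⟨_, _, rfl, ?_, ?_, ?_⟩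
      · push_cast
        exact hcnt'
      · push_cast
        rw [hBnext, pvFoldAddOrEq _ _ nwk hor]
        rw [if_neg (by intro hcontra; exact ht (hnw_qual.1 hcontra.1))]
      · push_cast
        intro s hs
        rcases hq_mem s hs with h | h
        · exact absurd (hnw_qual.1 (h ▸ hs)) ht
        · exact hsub s h

lemma pvMainEq (g : String) (k L t : Int) (hm : 1 ≤ L - k + 1) :
    find_clump g k L t = find_clump_alt g k L t := by
  simp only [find_clump, find_clump_alt]
  rw [pvCounterA, pvFoldAppendIf, pvItemsQual, List.nil_append]
  set N : ℕ := (max (PySem.Str.len g - L) 0).toNat with hN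
  have hNval : (N : Int) = max (PySem.Str.len g - L) 0 := Int.toNat_of_nonneg (le_max_right _ _)
  have h1 : PySem.List.pyRange 0 (PySem.Str.len g - L) 1 = PySem.List.pyRange 0 (N : Int) 1 := by
    rcases le_or_gt 0 (PySem.Str.len g - L) with h | h
    · rw [hNval, max_eq_left h]
    · rw [PySem.List.pyRange_one_eq_nil (by omega), hNval, max_eq_right (by omega),
        PySem.List.pyRange_one_eq_nil (by omega)]
  obtain ⟨d, a, hfold, _, hofl, _⟩ := pvInv g k L t hm N
  rw [h1, hfold]
  have h2 : max (PySem.Str.len g - L) 0 + 1 = (N : Int) + 1 := by rw [hNval]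
  rw [h2]
  show PySem.Set.ofList a = _
  exact hofl

lemma pvDegenEq (g : String) (k L t : Int) (hk : L - k + 1 ≤ 0) (hn : PySem.Str.len g ≤ L) :
    find_clump g k L t = find_clump_alt g k L t := by
  simp only [find_clump, find_clump_alt]
  rw [PySem.List.pyRange_one_eq_nil hk, PySem.List.pyRange_one_eq_nil (by omega : PySem.Str.len g - L ≤ 0)]
  rw [max_eq_right (by omega : PySem.Str.len g - L ≤ 0)]
  rw [show (0:Int) + 1 = 0 + 1 from rfl,
    PySem.List.pyRange_one_succ_right (by norm_num), PySem.List.pyRange_one_eq_nil (by norm_num)]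
  simp only [List.foldl_nil, List.foldl_cons, List.nil_append, pvStepB]
  rw [PySem.List.pyRange_one_eq_nil (by omega : 0 + L - k + 1 ≤ 0)]
  simp [PySem.Dict.empty, PySem.Set.empty, PySem.Set.ofList]

-- ===== VERDICT (by name: the statement is the Claim_ definition above) =====
theorem find_clump_spec : Claim_equal_find_clump := by
  intro genome k L t _ hpre
  unfold Spec_find_clump
  rcases hpre with ⟨_, hk⟩ | h
  · exact pvMainEq genome k L t (by omega)
  · by_cases hm : 1 ≤ L - k + 1
    · exact pvMainEq genome k L t hm
    · exact pvDegenEq genome k L t (by omega) h
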